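-- pv_equiv track=rewrite | github.com/eighties8/tossword | scripts/run_dance_to_light.py | is_valid_move_with_rearrangement
-- ===== SOURCE A (Python) =====
-- def is_valid_move_with_rearrangement(word1, word2):
--     """Check if word2 is a valid move from word1 (exactly one letter different, rearrangement allowed)"""
--     if len(word1) != len(word2) or word1 == word2:
--         return False
--
--     # Count letter frequencies in both words
--     freq1 = {}
--     freq2 = {}
--
--     for char in word1:
--         freq1[char] = freq1.get(char, 0) + 1
--
--     for char in word2:
--         freq2[char] = freq2.get(char, 0) + 1
--
--     # Calculate differences
--     letters_removed = 0
--     letters_added = 0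
--
--     # Check what letters were removed
--     for char, count in freq1.items():
--         if char not in freq2:
--             letters_removed += count
--         elif freq2[char] < count:
--             letters_removed += count - freq2[char]
--
--     # Check what letters were added
--     for char, count in freq2.items():
--         if char not in freq1:
--             letters_added += count
--         elif freq1[char] < count:
--             letters_added += count - freq1[char]
--
--     # Valid move: exactly one letter removed and one letter added
--     return letters_removed == 1 and letters_added == 1
-- ===== SOURCE B (Python) =====
-- def is_valid_move_with_rearrangement(word1, word2):
--     """Check if word2 is a valid move from word1 (exactly one letter different, rearrangement allowed)"""
--     s1 = sorted(word1)
--     s2 = sorted(word2)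
--     removed = 0
--     added = 0
--     i = 0
--     j = 0
--     while i < len(s1) and j < len(s2):
--         if s1[i] == s2[j]:
--             i += 1
--             j += 1
--         elif s1[i] < s2[j]:
--             removed += 1
--             i += 1
--         else:
--             added += 1
--             j += 1
--     removed += len(s1) - i
--     added += len(s2) - j
--     return removed == 1 and added == 1
-- ===== Notes on version B (the rewrite author's own statement) =====
-- stated objective: alternative
-- what changed: Replaced the two frequency dictionaries and the two difference-summing loops over their items by sorting both words and merge-walking the two sorted character lists with two indices, counting removed/added letters as the merge proceeds; the length and equality guards fall out of the counts.
import Mathlib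
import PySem

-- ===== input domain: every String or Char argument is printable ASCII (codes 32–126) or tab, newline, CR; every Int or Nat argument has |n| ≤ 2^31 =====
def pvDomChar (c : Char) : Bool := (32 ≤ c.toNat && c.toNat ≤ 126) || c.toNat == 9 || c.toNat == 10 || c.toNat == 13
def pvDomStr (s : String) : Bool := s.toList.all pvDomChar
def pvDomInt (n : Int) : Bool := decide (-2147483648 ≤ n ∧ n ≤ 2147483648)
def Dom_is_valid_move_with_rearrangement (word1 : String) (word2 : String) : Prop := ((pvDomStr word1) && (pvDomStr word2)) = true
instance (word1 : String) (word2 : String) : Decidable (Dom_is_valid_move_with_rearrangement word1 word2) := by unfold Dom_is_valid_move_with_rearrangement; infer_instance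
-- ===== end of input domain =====

-- B replaces A's frequency dictionaries and item-loops by sorting both words and
-- merge-walking the two sorted character lists (alternative algorithm, similar cost).


-- ===== PORT A =====
-- the frequency-dict loop `freq[char] = freq.get(char, 0) + 1`
def pvFreq (cs : List Char) : PySem.Dict Char Int :=
  cs.foldl (fun d c => d.insert c (d.getD c 0 + 1)) PySem.Dict.empty

-- the removed/added loop over `freq.items()`, comparing against the other dict
def pvDiffCount (items : List (Char × Int)) (other : PySem.Dict Char Int) : Int :=
  items.foldl (fun acc p =>
    if ¬ other.contains p.1 then acc + p.2
    else if other.getD p.1 0 < p.2 then acc + (p.2 - other.getD p.1 0)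
    else acc) 0

def is_valid_move_with_rearrangement (word1 : String) (word2 : String) : Bool :=
  if PySem.Str.len word1 ≠ PySem.Str.len word2 ∨ word1 = word2 then false
  else
    let freq1 := pvFreq word1.toList
    let freq2 := pvFreq word2.toList
    let letters_removed := pvDiffCount freq1.items freq2
    let letters_added := pvDiffCount freq2.items freq1
    letters_removed == 1 && letters_added == 1

-- ===== PORT B =====
-- the while-loop with indices i, j over the two sorted lists: structural recursion
-- on the unread suffixes, returning (removed, added)
def pvMergeDiff : List Char → List Char → Nat × Nat
  | [], ys => (0, ys.length)
  | x :: xs, [] => ((x :: xs).length, 0)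
  | x :: xs, y :: ys =>
    if x = y then pvMergeDiff xs ys
    else if x < y then
      let p := pvMergeDiff xs (y :: ys); (p.1 + 1, p.2)
    else
      let p := pvMergeDiff (x :: xs) ys; (p.1, p.2 + 1)

def is_valid_move_with_rearrangement_alt (word1 : String) (word2 : String) : Bool :=
  let s1 := PySem.List.sorted word1.toList (fun c => c) false
  let s2 := PySem.List.sorted word2.toList (fun c => c) false
  let p := pvMergeDiff s1 s2
  p.1 == 1 && p.2 == 1

-- ===== PRECONDITION & SPEC =====
def Spec_is_valid_move_with_rearrangement (word1 : String) (word2 : String) (out : Bool) : Prop := out = is_valid_move_with_rearrangement_alt word1 word2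
instance (word1 : String) (word2 : String) (out : Bool) : Decidable (Spec_is_valid_move_with_rearrangement word1 word2 out) := by unfold Spec_is_valid_move_with_rearrangement; infer_instance

-- ===== CLAIM (what is proved, stated in full; the proofs are below) =====
def Claim_equal_is_valid_move_with_rearrangement : Prop := ∀ (word1 : String) (word2 : String), Dom_is_valid_move_with_rearrangement word1 word2 → Spec_is_valid_move_with_rearrangement word1 word2 (is_valid_move_with_rearrangement word1 word2)

-- ===== LEMMAS AND PROOFS =====

-- pulling a fresh minimal element out of a truncated multiset difference
theorem pvSubConsLeft (x : Char) (s t : Multiset Char) (h : Multiset.count x t = 0) :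
    (x ::ₘ s) - t = x ::ₘ (s - t) := by
  ext a
  by_cases hax : a = x
  · subst hax
    simp [Multiset.count_sub, h]
  · simp [Multiset.count_sub, hax]

theorem pvSubConsRight (x : Char) (s t : Multiset Char) (h : Multiset.count x t = 0) :
    t - (x ::ₘ s) = t - s := by
  ext a
  by_cases hax : a = x
  · subst hax
    simp [Multiset.count_sub, h]
  · simp [Multiset.count_sub, hax]

-- B side: on sorted lists the merge walk computes the cardinalities of the two
-- truncated multiset differences.
theorem pvMergeDiff_eq_aux (n : Nat) : ∀ (xs ys : List Char), xs.length + ys.length ≤ n →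
    xs.Pairwise (· ≤ ·) → ys.Pairwise (· ≤ ·) →
    pvMergeDiff xs ys = (((xs : Multiset Char) - ys).card, ((ys : Multiset Char) - xs).card) := by
  induction n with
  | zero =>
    intro xs ys hlen hx hy
    cases xs with
    | nil => simp [pvMergeDiff]
    | cons x xs' => simp at hlen
  | succ n ih =>
    intro xs ys hlen hx hy
    cases xs with
    | nil => simp [pvMergeDiff]
    | cons x xs' =>
      cases ys with
      | nil => simp [pvMergeDiff]
      | cons y ys' =>
        have hx' : xs'.Pairwise (· ≤ ·) := (List.pairwise_cons.mp hx).2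
        have hy' : ys'.Pairwise (· ≤ ·) := (List.pairwise_cons.mp hy).2
        simp only [pvMergeDiff]
        by_cases hxy : x = y
        · subst hxy
          rw [if_pos rfl, ih xs' ys' (by simp at hlen; omega) hx' hy']
          have h1 : ((x :: xs' : List Char) : Multiset Char) - ((x :: ys' : List Char) : Multiset Char)
              = ((xs' : Multiset Char) - (ys' : Multiset Char)) := by
            rw [← Multiset.cons_coe, ← Multiset.cons_coe, Multiset.sub_cons, Multiset.erase_cons_head]
          have h2 : ((x :: ys' : List Char) : Multiset Char) - ((x :: xs' : List Char) : Multiset Char)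
              = ((ys' : Multiset Char) - (xs' : Multiset Char)) := by
            rw [← Multiset.cons_coe, ← Multiset.cons_coe, Multiset.sub_cons, Multiset.erase_cons_head]
          rw [h1, h2]
        · rw [if_neg hxy]
          by_cases hlt : x < y
          · rw [if_pos hlt]
            have hx_not : Multiset.count x ((y :: ys' : List Char) : Multiset Char) = 0 := by
              rw [Multiset.coe_count, List.count_eq_zero]
              intro hmem
              have hy_le : y ≤ x := by
                rcases List.mem_cons.mp hmem with h | h
                · exact le_of_eq h.symm
                · exact (List.pairwise_cons.mp hy).1 x h
              exact absurd hlt (not_lt.mpr hy_le)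
            rw [ih xs' (y :: ys') (by simp at hlen ⊢; omega) hx' hy]
            have h1 : ((x :: xs' : List Char) : Multiset Char) - ((y :: ys' : List Char) : Multiset Char)
                = x ::ₘ ((xs' : Multiset Char) - ((y :: ys' : List Char) : Multiset Char)) := by
              rw [show ((x :: xs' : List Char) : Multiset Char) = x ::ₘ (xs' : Multiset Char) from
                (Multiset.cons_coe x xs').symm]
              exact pvSubConsLeft x _ _ hx_not
            have h2 : ((y :: ys' : List Char) : Multiset Char) - ((x :: xs' : List Char) : Multiset Char)
                = ((y :: ys' : List Char) : Multiset Char) - (xs' : Multiset Char) := by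
              rw [show ((x :: xs' : List Char) : Multiset Char) = x ::ₘ (xs' : Multiset Char) from
                (Multiset.cons_coe x xs').symm]
              exact pvSubConsRight x _ _ hx_not
            rw [h1, h2, Multiset.card_cons]
          · rw [if_neg hlt]
            have hyx : y < x := lt_of_le_of_ne (not_lt.mp hlt) (fun h => hxy h.symm)
            have hy_not : Multiset.count y ((x :: xs' : List Char) : Multiset Char) = 0 := by
              rw [Multiset.coe_count, List.count_eq_zero]
              intro hmem
              have hx_le : x ≤ y := by
                rcases List.mem_cons.mp hmem with h | h
                · exact le_of_eq h.symm
                · exact (List.pairwise_cons.mp hx).1 y h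
              exact absurd hyx (not_lt.mpr hx_le)
            rw [ih (x :: xs') ys' (by simp at hlen ⊢; omega) hx hy']
            have h1 : ((x :: xs' : List Char) : Multiset Char) - ((y :: ys' : List Char) : Multiset Char)
                = ((x :: xs' : List Char) : Multiset Char) - (ys' : Multiset Char) := by
              rw [show ((y :: ys' : List Char) : Multiset Char) = y ::ₘ (ys' : Multiset Char) from
                (Multiset.cons_coe y ys').symm]
              exact pvSubConsRight y _ _ hy_not
            have h2 : ((y :: ys' : List Char) : Multiset Char) - ((x :: xs' : List Char) : Multiset Char)
                = y ::ₘ ((ys' : Multiset Char) - ((x :: xs' : List Char) : Multiset Char)) := by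
              rw [show ((y :: ys' : List Char) : Multiset Char) = y ::ₘ (ys' : Multiset Char) from
                (Multiset.cons_coe y ys').symm]
              exact pvSubConsLeft y _ _ hy_not
            rw [h1, h2, Multiset.card_cons]

theorem pvMergeDiff_eq (xs ys : List Char)
    (hx : xs.Pairwise (· ≤ ·)) (hy : ys.Pairwise (· ≤ ·)) :
    pvMergeDiff xs ys = (((xs : Multiset Char) - ys).card, ((ys : Multiset Char) - xs).card) :=
  pvMergeDiff_eq_aux (xs.length + ys.length) xs ys le_rfl hx hy

-- A side: the items-foldl as a sum
theorem pvDiffCount_foldl (other : PySem.Dict Char Int) (items : List (Char × Int)) (n : Int) :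
    items.foldl (fun acc p =>
      if ¬ other.contains p.1 then acc + p.2
      else if other.getD p.1 0 < p.2 then acc + (p.2 - other.getD p.1 0)
      else acc) n
    = n + (items.map (fun p =>
        if ¬ other.contains p.1 then p.2
        else if other.getD p.1 0 < p.2 then p.2 - other.getD p.1 0
        else 0)).sum := by
  induction items generalizing n with
  | nil => simp
  | cons p ps ihp =>
    simp only [List.foldl_cons, List.map_cons, List.sum_cons, ihp]
    split_ifs <;> ring

-- the Nat-level sum over the distinct characters of u is the difference's cardinality
theorem pvSumCount_eq (u v : List Char) :
    ((PySem.Set.ofList u).map (fun k => List.count k u - List.count k v)).sum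
      = ((u : Multiset Char) - (v : Multiset Char)).card := by
  have hfin : (PySem.Set.ofList u).toFinset = u.toFinset := by
    apply Finset.ext
    intro a
    simp [List.mem_toFinset, PySem.Set.mem_ofList]
  have hsubset : ((u : Multiset Char) - (v : Multiset Char)).toFinset ⊆ u.toFinset := by
    intro a ha
    rw [Multiset.mem_toFinset] at ha
    rw [List.mem_toFinset, ← Multiset.mem_coe]
    exact Multiset.mem_of_le (Multiset.sub_le_self _ _) ha
  calc ((PySem.Set.ofList u).map (fun k => List.count k u - List.count k v)).sum
      = ∑ x ∈ (PySem.Set.ofList u).toFinset, (List.count x u - List.count x v) :=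
        (List.sum_toFinset _ (PySem.Set.nodup_ofList u)).symm
    _ = ∑ x ∈ u.toFinset, (List.count x u - List.count x v) := by rw [hfin]
    _ = ∑ x ∈ u.toFinset, Multiset.count x ((u : Multiset Char) - (v : Multiset Char)) := by
        apply Finset.sum_congr rfl
        intro x _
        rw [Multiset.count_sub, Multiset.coe_count, Multiset.coe_count]
    _ = ∑ x ∈ ((u : Multiset Char) - (v : Multiset Char)).toFinset,
          Multiset.count x ((u : Multiset Char) - (v : Multiset Char)) := by
        refine (Finset.sum_subset hsubset ?_).symm
        intro x _ hxn
        rw [Multiset.mem_toFinset] at hxn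
        exact Multiset.count_eq_zero.mpr hxn
    _ = ((u : Multiset Char) - (v : Multiset Char)).card := Multiset.toFinset_sum_count_eq _

-- casting a Nat-valued list sum to Int commutes with mapping
theorem pvSumCastEq (l : List Char) (f : Char → Nat) :
    ((l.map f).sum : Int) = (l.map (fun k => ((f k : Nat) : Int))).sum := by
  induction l with
  | nil => simp
  | cons x xs ihx => simp [ihx]

theorem pvDiffCount_eq (u v : List Char) :
    pvDiffCount (pvFreq u).items (pvFreq v) = ((((u : Multiset Char) - (v : Multiset Char)).card : Nat) : Int) := by
  have hfu : pvFreq u = PySem.Dict.counter u := PySem.Dict.foldl_insert_getD_add_one_eq_counter u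
  have hfv : pvFreq v = PySem.Dict.counter v := PySem.Dict.foldl_insert_getD_add_one_eq_counter v
  unfold pvDiffCount
  rw [hfu, hfv, pvDiffCount_foldl, zero_add, PySem.Dict.items_counter, List.map_map]
  have hterm : ((fun p : Char × Int =>
        if ¬ (PySem.Dict.counter v).contains p.1 then p.2
        else if (PySem.Dict.counter v).getD p.1 0 < p.2 then p.2 - (PySem.Dict.counter v).getD p.1 0
        else 0) ∘ fun k => (k, (List.count k u : Int)))
      = fun k => ((List.count k u - List.count k v : Nat) : Int) := by
    funext k
    simp only [Function.comp_apply, PySem.Dict.contains_counter, PySem.Dict.getD_counter]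
    by_cases hk : k ∈ v
    · by_cases hcmp : List.count k v < List.count k u
      · rw [if_neg (by simp [hk]), if_pos (by exact_mod_cast hcmp)]
        push_cast [Nat.cast_sub (le_of_lt hcmp)]
        ring
      · rw [if_neg (by simp [hk]), if_neg (by exact_mod_cast hcmp)]
        have : List.count k u - List.count k v = 0 := Nat.sub_eq_zero_of_le (not_lt.mp hcmp)
        rw [this, Nat.cast_zero]
    · have hz : List.count k v = 0 := List.count_eq_zero.mpr hk
      rw [if_pos (by simp [hk]), hz, Nat.sub_zero]
  rw [hterm, ← pvSumCount_eq u v]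
  exact (pvSumCastEq (PySem.Set.ofList u) (fun k => List.count k u - List.count k v)).symm

theorem pvBeqCast (n : Nat) : ((n : Int) == (1 : Int)) = (n == 1) := by
  by_cases h : n = 1
  · simp [h]
  · have h' : (n : Int) ≠ 1 := by exact_mod_cast h
    simp [h, h']

-- ===== VERDICT (by name: the statement is the Claim_ definition above) =====
theorem is_valid_move_with_rearrangement_spec : Claim_equal_is_valid_move_with_rearrangement := by
  intro word1 word2 _
  unfold Spec_is_valid_move_with_rearrangement
  simp only [is_valid_move_with_rearrangement, is_valid_move_with_rearrangement_alt]
  rw [pvMergeDiff_eq _ _ (PySem.List.sorted_pairwise word1.toList (fun c => c))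
        (PySem.List.sorted_pairwise word2.toList (fun c => c))]
  have hs1 : ((PySem.List.sorted word1.toList (fun c => c) false : List Char) : Multiset Char)
      = ((word1.toList : List Char) : Multiset Char) :=
    Multiset.coe_eq_coe.mpr (PySem.List.sorted_perm _ _ _)
  have hs2 : ((PySem.List.sorted word2.toList (fun c => c) false : List Char) : Multiset Char)
      = ((word2.toList : List Char) : Multiset Char) :=
    Multiset.coe_eq_coe.mpr (PySem.List.sorted_perm _ _ _)
  rw [hs1, hs2]
  by_cases hg : (PySem.Str.len word1 ≠ PySem.Str.len word2 ∨ word1 = word2)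
  · rw [if_pos hg]
    rcases hg with hlen | heq
    · have h1 : word1.toList.length ≠ word2.toList.length := by
        intro h
        exact hlen (by simp [PySem.Str.len_eq, h])
      have hc1 : ((word1.toList : Multiset Char) - (word2.toList : Multiset Char)).card
          + ((word1.toList : Multiset Char) ∩ (word2.toList : Multiset Char)).card
          = word1.toList.length := by
        rw [← Multiset.card_add, Multiset.sub_add_inter, Multiset.coe_card]
      have hc2 : ((word2.toList : Multiset Char) - (word1.toList : Multiset Char)).card
          + ((word2.toList : Multiset Char) ∩ (word1.toList : Multiset Char)).card
          = word2.toList.length := by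
        rw [← Multiset.card_add, Multiset.sub_add_inter, Multiset.coe_card]
      have hint : ((word1.toList : Multiset Char) ∩ (word2.toList : Multiset Char)).card
          = ((word2.toList : Multiset Char) ∩ (word1.toList : Multiset Char)).card := by
        rw [Multiset.inter_comm]
      have hand : ∀ (a b : Nat), ¬(a = 1 ∧ b = 1) → ((a == 1 && b == 1) = false) := by
        intro a b h
        by_cases ha : a = 1 <;> by_cases hb : b = 1 <;> simp [ha, hb]
        exact h ⟨ha, hb⟩
      symm
      apply hand
      rintro ⟨e1, e2⟩
      omega
    · subst heq
      simp
  · rw [if_neg hg]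
    simp only [pvDiffCount_eq]
    rw [pvBeqCast, pvBeqCast]
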